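-- pv_equiv track=rewrite | github.com/janek37/qwantz_metadata | qwantz_metadata/combine_metadata.py | get_panels
-- ===== SOURCE A (Python) =====
-- from collections.abc import Iterable, Iterator
--
-- def get_panels(lines: Iterable[str]) -> list[list[str]]:
--     panels = []
--     current_panel = []
--     for line in lines:
--         line = line.rstrip()
--         if not line:
--             panels.append(current_panel)
--             current_panel = []
--         else:
--             current_panel.append(line)
--     if current_panel:
--         panels.append(current_panel)
--     return panels
-- ===== SOURCE B (Python) =====
-- def get_panels(lines):
--     # Strip all lines first, then repeatedly split off the segment before the
--     # first blank line; the trailing segment is kept only if non-empty.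
--     stripped = [line.rstrip() for line in lines]
--     panels = []
--     while '' in stripped:
--         i = stripped.index('')
--         panels.append(stripped[:i])
--         stripped = stripped[i + 1:]
--     if stripped:
--         panels.append(stripped)
--     return panels
-- ===== Notes on version B (the rewrite author's own statement) =====
-- stated objective: alternative
-- what changed: B strips all lines up front and then repeatedly splits off the segment before the first blank line via index/slice, instead of A's single pass with a per-line current-panel accumulator.
import Mathlib
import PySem

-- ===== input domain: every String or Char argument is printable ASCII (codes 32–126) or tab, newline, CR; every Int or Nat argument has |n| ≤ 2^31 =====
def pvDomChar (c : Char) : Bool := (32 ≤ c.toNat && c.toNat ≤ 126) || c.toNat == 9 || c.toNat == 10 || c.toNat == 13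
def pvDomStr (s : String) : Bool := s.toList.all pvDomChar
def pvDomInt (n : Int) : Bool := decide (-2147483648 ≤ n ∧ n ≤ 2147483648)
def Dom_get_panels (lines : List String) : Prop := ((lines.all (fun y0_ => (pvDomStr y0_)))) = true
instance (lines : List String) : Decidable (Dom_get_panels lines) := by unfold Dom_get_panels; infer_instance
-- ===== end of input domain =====

-- B strips all lines first and then repeatedly splits off the segment before the first
-- blank line with index/slice (different decomposition, same cost; equivalence of the
-- RETURN values is what is proved).

-- ===== PORT A =====
-- A: one pass, per-line accumulator (current_panel), blank line flushes it.
def get_panels (lines : List String) : List (List String) :=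
  let st := lines.foldl
    (fun (s : List (List String) × List String) line =>
      let line := PySem.Str.rstrip line
      if line = "" then (s.1 ++ [s.2], [])
      else (s.1, s.2 ++ [line]))
    ([], [])
  if st.2 ≠ [] then st.1 ++ [st.2] else st.1

-- ===== PORT B =====
-- helper for B's while-loop: repeatedly find the first blank line and slice around it
def getPanelsAltLoop (panels : List (List String)) (stripped : List String) :
    List (List String) :=
  match h : PySem.List.index? stripped "" with
  | some i =>
      getPanelsAltLoop (panels ++ [PySem.List.slice stripped none (some (i : Int))])
        (PySem.List.slice stripped (some ((i : Int) + 1)) none)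
  | none => if stripped ≠ [] then panels ++ [stripped] else panels
termination_by stripped.length
decreasing_by
  obtain ⟨hk, -, -⟩ := PySem.List.getElem_of_index?_eq_some h
  have e : ((i : Int) + 1) = (((i + 1 : Nat)) : Int) := by push_cast; ring
  rw [e, PySem.List.slice_from_natCast]
  simp only [List.length_drop]
  omega

def get_panels_alt (lines : List String) : List (List String) :=
  getPanelsAltLoop [] (lines.map PySem.Str.rstrip)

-- ===== PRECONDITION & SPEC =====
def Spec_get_panels (lines : List String) (out : List (List String)) : Prop := out = get_panels_alt lines
instance (lines : List String) (out : List (List String)) : Decidable (Spec_get_panels lines out) := by unfold Spec_get_panels; infer_instance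

-- ===== CLAIM (what is proved, stated in full; the proofs are below) =====
def Claim_equal_get_panels : Prop := ∀ (lines : List String), Dom_get_panels lines → Spec_get_panels lines (get_panels lines)

-- ===== LEMMAS AND PROOFS =====

-- reference recursion both ports are reduced to
def panelsGo (s : List String) (cur : List String) : List (List String) :=
  match s with
  | [] => if cur = [] then [] else [cur]
  | x :: xs => if x = "" then cur :: panelsGo xs [] else panelsGo xs (cur ++ [x])

theorem panelsGo_split (pre suf cur : List String) (h : "" ∉ pre) :
    panelsGo (pre ++ "" :: suf) cur = (cur ++ pre) :: panelsGo suf [] := by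
  induction pre generalizing cur with
  | nil => simp [panelsGo]
  | cons x pre ih =>
      have hx : x ≠ "" := fun hx => h (by simp [hx])
      simp only [List.cons_append, panelsGo, if_neg hx]
      rw [ih _ (fun hm => h (by simp [hm]))]
      simp

theorem panelsGo_no_blank (s cur : List String) (h : "" ∉ s) :
    panelsGo s cur = if cur ++ s = [] then [] else [cur ++ s] := by
  induction s generalizing cur with
  | nil => simp [panelsGo]
  | cons x s ih =>
      have hx : x ≠ "" := fun hx => h (by simp [hx])
      simp only [panelsGo, if_neg hx]
      rw [ih _ (fun hm => h (by simp [hm]))]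
      simp

theorem getPanelsAltLoop_eq (s : List String) (panels : List (List String)) :
    getPanelsAltLoop panels s = panels ++ panelsGo s [] := by
  fun_induction getPanelsAltLoop panels s with
  | case1 panels s i h ih =>
      obtain ⟨pre, suf, rfl, rfl, hpre⟩ := (PySem.List.index?_eq_some_iff _ _ _).1 h
      rw [ih]
      have htake : PySem.List.slice (pre ++ "" :: suf) none (some ((pre.length : Nat) : Int))
          = pre := by
        rw [PySem.List.slice_to_natCast]
        simp
      have hdrop : PySem.List.slice (pre ++ "" :: suf) (some ((pre.length : Int) + 1)) none
          = suf := by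
        have e : ((pre.length : Int) + 1) = (((pre.length + 1 : Nat)) : Int) := by push_cast; ring
        rw [e, PySem.List.slice_from_natCast]
        simp [List.drop_append]
      rw [htake, hdrop, panelsGo_split pre suf [] hpre]
      simp
  | case2 panels s h hne =>
      have hnm : "" ∉ s := (PySem.List.index?_eq_none_iff _ _).1 h
      rw [panelsGo_no_blank s [] hnm]
      simp only [List.nil_append]
      split <;> simp_all
  | case3 panels s h hne =>
      have : s = [] := by simpa using hne
      subst this
      simp [panelsGo]

-- A's fold (over already-stripped lines) with finalization equals panelsGo
theorem foldA_go (s : List String) (panels : List (List String)) (cur : List String) :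
    (let st := s.foldl
        (fun (st : List (List String) × List String) x =>
          if x = "" then (st.1 ++ [st.2], []) else (st.1, st.2 ++ [x]))
        (panels, cur)
      if st.2 ≠ [] then st.1 ++ [st.2] else st.1) = panels ++ panelsGo s cur := by
  induction s generalizing panels cur with
  | nil =>
      simp only [List.foldl_nil, panelsGo]
      by_cases hc : cur = [] <;> simp [hc]
  | cons x xs ih =>
      simp only [List.foldl_cons, panelsGo]
      by_cases hx : x = ""
      · simp only [if_pos hx]
        rw [ih]
        simp
      · simp only [if_neg hx]
        exact ih panels (cur ++ [x])

-- ===== VERDICT (by name: the statement is the Claim_ definition above) =====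
theorem get_panels_spec : Claim_equal_get_panels := by
  intro lines _
  show get_panels lines = get_panels_alt lines
  unfold get_panels get_panels_alt
  rw [getPanelsAltLoop_eq]
  have := foldA_go (lines.map PySem.Str.rstrip) [] []
  simp only [List.foldl_map] at this
  simpa using this
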